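-- pv_equiv track=rewrite | github.com/yongwoo-jeong/Algorithm | 프로그래머스/unrated/150369. 택배 배달과 수거하기/택배 배달과 수거하기.py | solution
-- ===== SOURCE A (Python) =====
-- def solution(cap, n, deliveries, pickups):
--     answer = 0
--     del_cnt = 0
--     pick_cnt = 0
--
--     for i in range(n):
--         del_cnt += deliveries[n-i-1]
--         pick_cnt += pickups[n-i-1]
--
--         while del_cnt > 0 or pick_cnt > 0:
--             del_cnt -= cap
--             pick_cnt -= cap
--             answer += n-i
--     return answer*2
-- ===== SOURCE B (Python) =====
-- def solution(cap, n, deliveries, pickups):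
--     total = 0
--     d = 0
--     p = 0
--     for i in range(n):
--         j = n - i - 1
--         d += deliveries[j]
--         p += pickups[j]
--         trips = max(-(-d // cap), -(-p // cap), 0)
--         total += (j + 1) * trips
--         d -= trips * cap
--         p -= trips * cap
--     return 2 * total
-- ===== Notes on version B (the rewrite author's own statement) =====
-- stated objective: alternative
-- what changed: The inner while-loop that subtracts cap one trip at a time is replaced by a closed-form ceiling-division computing the number of trips needed at each position at once; it trades the data-dependent inner loop for two integer divisions per position.
-- outside the precondition, e.g. on solution(0, 1, [0], [0]): A returns 0, B raises ZeroDivisionError; on solution(-2, 1, [-3], [0]): A returns 0, B returns 4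
import Mathlib
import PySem

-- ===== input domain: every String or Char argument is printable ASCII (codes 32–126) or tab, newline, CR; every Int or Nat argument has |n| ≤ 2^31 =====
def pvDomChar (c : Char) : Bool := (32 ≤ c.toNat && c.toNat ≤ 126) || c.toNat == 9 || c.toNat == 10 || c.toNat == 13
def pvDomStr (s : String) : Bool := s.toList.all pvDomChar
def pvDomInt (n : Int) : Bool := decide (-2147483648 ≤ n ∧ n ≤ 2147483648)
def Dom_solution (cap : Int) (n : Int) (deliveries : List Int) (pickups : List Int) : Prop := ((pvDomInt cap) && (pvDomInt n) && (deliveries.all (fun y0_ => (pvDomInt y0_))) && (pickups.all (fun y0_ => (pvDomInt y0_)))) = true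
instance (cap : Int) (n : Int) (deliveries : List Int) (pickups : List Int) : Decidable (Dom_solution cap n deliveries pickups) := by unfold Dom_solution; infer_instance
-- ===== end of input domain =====

-- B replaces A's per-trip inner while-loop by a closed-form ceiling-division count of trips per position (alternative algorithm, O(n) loop iterations instead of data-dependent inner looping).


-- ===== PORT A =====
-- the inner 'while del_cnt > 0 or pick_cnt > 0' loop; the extra '0 < cap' guard only
-- makes the recursion total (in Python it diverges when cap ≤ 0 and the condition holds)
def solWhile (cap dist del pick ans : Int) : Int × Int × Int :=
  if _h : (0 < del ∨ 0 < pick) ∧ 0 < cap then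
    solWhile cap dist (del - cap) (pick - cap) (ans + dist)
  else (del, pick, ans)
termination_by (max del pick).toNat
decreasing_by omega

def solution (cap : Int) (n : Int) (deliveries : List Int) (pickups : List Int) : Int :=
  let s := (PySem.List.pyRange 0 n 1).foldl
    (fun (st : Int × Int × Int) i =>
      let del := st.1 + PySem.List.pyGetD deliveries (n - i - 1) 0
      let pick := st.2.1 + PySem.List.pyGetD pickups (n - i - 1) 0
      solWhile cap (n - i) del pick st.2.2)
    (0, 0, 0)
  s.2.2 * 2

-- ===== PORT B =====
-- ceiling division -(-a // b), as written in Source B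
def ceilDiv (a b : Int) : Int := -(PySem.Int.floordiv (-a) b)

def solution_alt (cap : Int) (n : Int) (deliveries : List Int) (pickups : List Int) : Int :=
  let s := (PySem.List.pyRange 0 n 1).foldl
    (fun (st : Int × Int × Int) i =>
      let j := n - i - 1
      let d := st.1 + PySem.List.pyGetD deliveries j 0
      let p := st.2.1 + PySem.List.pyGetD pickups j 0
      let trips := max (max (ceilDiv d cap) (ceilDiv p cap)) 0
      (d - trips * cap, p - trips * cap, st.2.2 + (j + 1) * trips))
    (0, 0, 0)
  2 * s.2.2

-- ===== PRECONDITION & SPEC =====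
-- Pre_ requires 0 < cap (for cap ≤ 0 Python A diverges whenever any trip is needed, and
-- returns only in the degenerate all-nonpositive case, where B divides by cap) and that the
-- n indexed positions exist in both lists (otherwise A raises IndexError).
def Pre_solution (cap : Int) (n : Int) (deliveries : List Int) (pickups : List Int) : Prop :=
  0 < cap ∧ n ≤ (deliveries.length : Int) ∧ n ≤ (pickups.length : Int)
instance (cap : Int) (n : Int) (deliveries : List Int) (pickups : List Int) : Decidable (Pre_solution cap n deliveries pickups) := by unfold Pre_solution; infer_instance

def pvWitness_solution : Int × Int × List Int × List Int := (4, 2, [1, 0], [0, 3])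

def Spec_solution (cap : Int) (n : Int) (deliveries : List Int) (pickups : List Int) (out : Int) : Prop := out = solution_alt cap n deliveries pickups
instance (cap : Int) (n : Int) (deliveries : List Int) (pickups : List Int) (out : Int) : Decidable (Spec_solution cap n deliveries pickups out) := by unfold Spec_solution; infer_instance

-- ===== CLAIM (what is proved, stated in full; the proofs are below) =====
def Claim_equal_solution : Prop := ∀ (cap : Int) (n : Int) (deliveries : List Int) (pickups : List Int), Dom_solution cap n deliveries pickups → Pre_solution cap n deliveries pickups → Spec_solution cap n deliveries pickups (solution cap n deliveries pickups)

-- ===== LEMMAS AND PROOFS =====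

lemma ceilDiv_bounds (x b : Int) (hb : 0 < b) :
    (ceilDiv x b - 1) * b < x ∧ x ≤ ceilDiv x b * b := by
  have := (PySem.Int.neg_floordiv_neg_eq_iff_of_pos (a := x) (b := b) (q := ceilDiv x b) hb).mp rfl
  exact this

lemma ceilDiv_pos (x b : Int) (hb : 0 < b) (hx : 0 < x) : 1 ≤ ceilDiv x b := by
  obtain ⟨_, h2⟩ := ceilDiv_bounds x b hb
  nlinarith

lemma ceilDiv_nonpos (x b : Int) (hb : 0 < b) (hx : x ≤ 0) : ceilDiv x b ≤ 0 := by
  obtain ⟨h1, _⟩ := ceilDiv_bounds x b hb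
  nlinarith

lemma ceilDiv_sub_self (x b : Int) (hb : 0 < b) : ceilDiv (x - b) b = ceilDiv x b - 1 := by
  obtain ⟨h1, h2⟩ := ceilDiv_bounds x b hb
  exact (PySem.Int.neg_floordiv_neg_eq_iff_of_pos (a := x - b) (b := b) (q := ceilDiv x b - 1) hb).mpr
    ⟨by nlinarith, by nlinarith⟩

-- closed form for the inner while loop of A, in terms of B's trips expression
lemma solWhile_closed (cap dist del pick ans : Int) (hc : 0 < cap) :
    solWhile cap dist del pick ans =
      (del - (max (max (ceilDiv del cap) (ceilDiv pick cap)) 0) * cap,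
       pick - (max (max (ceilDiv del cap) (ceilDiv pick cap)) 0) * cap,
       ans + dist * (max (max (ceilDiv del cap) (ceilDiv pick cap)) 0)) := by
  fun_induction solWhile cap dist del pick ans with
  | case1 del pick ans h ih =>
    rw [ih]
    have hd := ceilDiv_sub_self del cap hc
    have hp := ceilDiv_sub_self pick cap hc
    have hge : 1 ≤ max (ceilDiv del cap) (ceilDiv pick cap) := by
      rcases h.1 with hx | hx
      · exact le_max_of_le_left (ceilDiv_pos del cap hc hx)
      · exact le_max_of_le_right (ceilDiv_pos pick cap hc hx)
    have ht : max (max (ceilDiv (del - cap) cap) (ceilDiv (pick - cap) cap)) 0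
        = max (max (ceilDiv del cap) (ceilDiv pick cap)) 0 - 1 := by
      rw [hd, hp]; omega
    rw [ht]
    refine Prod.ext (by ring) (Prod.ext (by ring) ?_)
    simp only
    ring
  | case2 del pick ans h =>
    have hd : del ≤ 0 := by by_contra hx; exact h ⟨Or.inl (by omega), hc⟩
    have hp : pick ≤ 0 := by by_contra hx; exact h ⟨Or.inr (by omega), hc⟩
    have h1 := ceilDiv_nonpos del cap hc hd
    have h2 := ceilDiv_nonpos pick cap hc hp
    have ht : max (max (ceilDiv del cap) (ceilDiv pick cap)) 0 = 0 := by omega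
    rw [ht]
    refine Prod.ext (by ring) (Prod.ext (by ring) ?_)
    simp only
    ring

theorem solution_eq_alt (cap n : Int) (deliveries pickups : List Int) (hc : 0 < cap) :
    solution cap n deliveries pickups = solution_alt cap n deliveries pickups := by
  unfold solution solution_alt
  simp only
  rw [List.foldl_ext (g := fun (st : Int × Int × Int) i =>
      let j := n - i - 1
      let d := st.1 + PySem.List.pyGetD deliveries j 0
      let p := st.2.1 + PySem.List.pyGetD pickups j 0
      let trips := max (max (ceilDiv d cap) (ceilDiv p cap)) 0
      (d - trips * cap, p - trips * cap, st.2.2 + (j + 1) * trips))]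
  · exact mul_comm _ 2
  · intro st i _
    simp only
    rw [solWhile_closed _ _ _ _ _ hc]
    refine Prod.ext rfl (Prod.ext rfl ?_)
    simp only
    ring

-- ===== VERDICT (by name: the statement is the Claim_ definition above) =====
theorem solution_spec : Claim_equal_solution := by
  intro cap n deliveries pickups _ hpre
  exact solution_eq_alt cap n deliveries pickups hpre.1
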